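-- pv_equiv track=rewrite | github.com/AlexandruMDuma/pc-manager-dashboard | app.py | normalize_requests
-- ===== SOURCE A (Python) =====
-- def normalize_requests(rows):
--     result = []
--     for row in rows:
--         result.append({
--             'request_id': row.get('Request ID', ''),
--             'fmno': row.get('FMNO', ''),
--             'request_date': row.get('Request Date', ''),
--             'requester_fmno': row.get('Requester FMNO', ''),
--             'requester_name': row.get('Requester Name', ''),
--             'request_made_by': row.get('Request Made By', ''),
--             'request_made_to': row.get('Request Made To', ''),
--             'request_status': row.get('Request Status', ''),
--             'shared_with_manager': row.get('Shared With Manager', ''),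
--             'request_month': row.get('Request Month', ''),
--         })
--     return result
-- ===== SOURCE B (Python) =====
-- FIELDS = [
--     ('request_id', 'Request ID'),
--     ('fmno', 'FMNO'),
--     ('request_date', 'Request Date'),
--     ('requester_fmno', 'Requester FMNO'),
--     ('requester_name', 'Requester Name'),
--     ('request_made_by', 'Request Made By'),
--     ('request_made_to', 'Request Made To'),
--     ('request_status', 'Request Status'),
--     ('shared_with_manager', 'Shared With Manager'),
--     ('request_month', 'Request Month'),
-- ]
--
--
-- def normalize_requests(rows):
--     # Stage 1: transpose into per-field columns (one scan of rows per field).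
--     columns = {new: [row.get(old, '') for row in rows] for new, old in FIELDS}
--     # Stage 2: recombine the columns index-by-index into normalized rows.
--     return [{new: columns[new][i] for new, _ in FIELDS} for i in range(len(rows))]
-- ===== Notes on version B (the rewrite author's own statement) =====
-- stated objective: alternative
-- what changed: Replaces A's single row-by-row pass of ten inline .get() calls by a columnar two-stage algorithm: first transpose the input into one column list per target field, then recombine the columns index-by-index into the normalized rows.
import Mathlib
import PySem

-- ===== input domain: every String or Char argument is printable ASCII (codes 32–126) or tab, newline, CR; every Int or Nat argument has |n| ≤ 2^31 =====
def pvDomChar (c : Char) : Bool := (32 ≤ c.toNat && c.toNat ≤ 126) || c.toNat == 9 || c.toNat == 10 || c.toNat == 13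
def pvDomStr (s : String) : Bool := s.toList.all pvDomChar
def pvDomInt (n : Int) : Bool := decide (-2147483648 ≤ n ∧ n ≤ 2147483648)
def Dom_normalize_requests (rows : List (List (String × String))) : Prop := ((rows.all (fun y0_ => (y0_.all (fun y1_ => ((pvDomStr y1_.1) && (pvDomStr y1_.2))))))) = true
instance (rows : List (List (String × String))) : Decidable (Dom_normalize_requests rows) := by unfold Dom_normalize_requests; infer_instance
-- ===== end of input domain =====

-- B replaces A's row-by-row pass by a columnar two-stage algorithm (transpose into
-- per-field columns, then recombine index-by-index); objective: alternative, same cost.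

-- ===== PORT A =====
-- row.get(k, '') on the insertion-ordered dict = first match in the association list
def pyGetRow (row : List (String × String)) (k : String) : String :=
  ((row.lookup k).getD "")

def normalize_requests (rows : List (List (String × String))) : List (List (String × String)) :=
  rows.foldl (fun result row =>
    result ++ [[
      ("request_id", pyGetRow row "Request ID"),
      ("fmno", pyGetRow row "FMNO"),
      ("request_date", pyGetRow row "Request Date"),
      ("requester_fmno", pyGetRow row "Requester FMNO"),
      ("requester_name", pyGetRow row "Requester Name"),
      ("request_made_by", pyGetRow row "Request Made By"),
      ("request_made_to", pyGetRow row "Request Made To"),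
      ("request_status", pyGetRow row "Request Status"),
      ("shared_with_manager", pyGetRow row "Shared With Manager"),
      ("request_month", pyGetRow row "Request Month")]]) []

-- ===== PORT B =====
def FIELDS : List (String × String) := [
  ("request_id", "Request ID"),
  ("fmno", "FMNO"),
  ("request_date", "Request Date"),
  ("requester_fmno", "Requester FMNO"),
  ("requester_name", "Requester Name"),
  ("request_made_by", "Request Made By"),
  ("request_made_to", "Request Made To"),
  ("request_status", "Request Status"),
  ("shared_with_manager", "Shared With Manager"),
  ("request_month", "Request Month")]

-- stage 1: one column per target field (columns[new] in Source B; the dict's keys are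
-- exactly FIELDS' first components, so the association list is keyed the same way)
def pvColumns (rows : List (List (String × String))) : List (String × List String) :=
  FIELDS.map (fun p => (p.1, rows.map (fun row => ((row.lookup p.2).getD ""))))

-- stage 2: columns[new][i]; the index i < rows.length is always in range, so the
-- Python list indexing never raises and List.getD with "" is exact there
def normalize_requests_alt (rows : List (List (String × String))) : List (List (String × String)) :=
  let columns := pvColumns rows
  (List.range rows.length).map (fun i =>
    columns.map (fun c => (c.1, c.2.getD i "")))

-- ===== PRECONDITION & SPEC =====
def Spec_normalize_requests (rows : List (List (String × String))) (out : List (List (String × String))) : Prop := out = normalize_requests_alt rows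
instance (rows : List (List (String × String))) (out : List (List (String × String))) : Decidable (Spec_normalize_requests rows out) := by unfold Spec_normalize_requests; infer_instance

-- ===== CLAIM (what is proved, stated in full; the proofs are below) =====
def Claim_equal_normalize_requests : Prop := ∀ (rows : List (List (String × String))), Dom_normalize_requests rows → Spec_normalize_requests rows (normalize_requests rows)

-- ===== LEMMAS AND PROOFS =====
-- A's foldl with accumulator = map over rows
theorem normalize_foldl_acc (rows : List (List (String × String)))
    (acc : List (List (String × String))) :
    rows.foldl (fun result row =>
      result ++ [[
        ("request_id", pyGetRow row "Request ID"),
        ("fmno", pyGetRow row "FMNO"),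
        ("request_date", pyGetRow row "Request Date"),
        ("requester_fmno", pyGetRow row "Requester FMNO"),
        ("requester_name", pyGetRow row "Requester Name"),
        ("request_made_by", pyGetRow row "Request Made By"),
        ("request_made_to", pyGetRow row "Request Made To"),
        ("request_status", pyGetRow row "Request Status"),
        ("shared_with_manager", pyGetRow row "Shared With Manager"),
        ("request_month", pyGetRow row "Request Month")]]) acc
    = acc ++ rows.map (fun row => FIELDS.map (fun p => (p.1, ((row.lookup p.2).getD "")))) := by
  induction rows generalizing acc with
  | nil => simp
  | cons r rs ih =>
    simp only [List.foldl_cons, List.map_cons, ih, List.append_assoc]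
    rfl

-- B's columnar recombination = the same map over rows
theorem alt_eq_map (rows : List (List (String × String))) :
    normalize_requests_alt rows
    = rows.map (fun row => FIELDS.map (fun p => (p.1, ((row.lookup p.2).getD "")))) := by
  unfold normalize_requests_alt pvColumns
  apply List.ext_getElem
  · simp
  · intro i hi _
    simp only [List.getElem_map, List.getElem_range, List.map_map]
    apply List.map_congr_left
    intro p _
    simp only [Function.comp]
    have hi' : i < rows.length := by simpa using hi
    simp [List.getD, List.getElem?_map, List.getElem?_eq_getElem hi']

-- ===== VERDICT (by name: the statement is the Claim_ definition above) =====
theorem normalize_requests_spec : Claim_equal_normalize_requests := by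
  intro rows _
  show normalize_requests rows = normalize_requests_alt rows
  rw [alt_eq_map]
  exact normalize_foldl_acc rows []
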